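-- pv_equiv track=rewrite | github.com/AEPForGTE/ILLOD | ILLOD_IST/Function_Pool.py | check_order_ltr
-- ===== SOURCE A (Python) =====
-- def check_order_ltr(a, t):
--     abbv = a.lower()
--     term = t.lower()
--
--     pos_memory = 0
--     pos_memory_list = []
--     order_matching_string = ""
--
--     for j, char_from_abbv in enumerate(abbv):
--         for i, char_from_term in enumerate(term[pos_memory:]):
--             if char_from_abbv == char_from_term:
--                 order_matching_string = order_matching_string + char_from_abbv
--                 pos_memory = pos_memory + i + 1
--                 pos_memory_list.append(pos_memory-1)
--                 break
--     return order_matching_string == abbv, pos_memory_list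
-- ===== SOURCE B (Python) =====
-- def check_order_ltr(a, t):
--     abbv = a.lower()
--     term = t.lower()
--     # One pass over term: per-character occurrence lists, stored reversed so the
--     # smallest remaining occurrence sits at the end and is popped in O(1).
--     occ = {}
--     for i, ch in enumerate(term):
--         occ.setdefault(ch, []).append(i)
--     for lst in occ.values():
--         lst.reverse()
--     pos = 0
--     positions = []
--     ok = True
--     for ch in abbv:
--         stack = occ.get(ch, [])
--         while stack and stack[-1] < pos:
--             stack.pop()
--         if not stack:
--             ok = False
--         else:
--             i = stack[-1]
--             positions.append(i)
--             pos = i + 1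
--     return ok, positions
-- ===== Notes on version B (the rewrite author's own statement) =====
-- stated objective: faster
-- what changed: Instead of rescanning a fresh slice term[pos:] for every abbreviation character, B builds a per-character occurrence index of term in one pass and then consumes each character's occurrence stack (popping already-passed positions), so the inner scan over term disappears.
import Mathlib
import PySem

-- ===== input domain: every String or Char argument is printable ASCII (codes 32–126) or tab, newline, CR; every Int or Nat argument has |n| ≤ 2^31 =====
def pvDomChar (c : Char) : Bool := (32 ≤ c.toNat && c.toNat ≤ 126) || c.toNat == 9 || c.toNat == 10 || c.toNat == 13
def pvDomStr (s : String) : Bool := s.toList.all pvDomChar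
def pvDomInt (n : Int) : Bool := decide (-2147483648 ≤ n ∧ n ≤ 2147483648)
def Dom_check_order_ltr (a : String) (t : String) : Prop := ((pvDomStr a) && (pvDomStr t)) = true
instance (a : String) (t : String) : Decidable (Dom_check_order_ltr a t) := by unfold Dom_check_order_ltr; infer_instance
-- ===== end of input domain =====

-- B replaces A's per-character rescan of the slice term[pos:] by a per-character occurrence
-- index of term built once and then consumed stack-wise; objective: faster.

-- ===== PORT A =====
def pvInnerA (c : Char) : List (Int × Char) → Option Int
  | [] => none
  | (i, x) :: rest => if c == x then some i else pvInnerA c rest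

def pvStepA (term : List Char) (s : Int × List Int × List Char) (jc : Int × Char) :
    Int × List Int × List Char :=
  match pvInnerA jc.2 (PySem.List.enumerate (PySem.List.slice term (some s.1) none)) with
  | none => s
  | some i => (s.1 + i + 1, s.2.1 ++ [s.1 + i], s.2.2 ++ [jc.2])

def check_order_ltr (a : String) (t : String) : Bool × List Int :=
  let abbv := (PySem.Str.lower a).toList
  let term := (PySem.Str.lower t).toList
  let st := (PySem.List.enumerate abbv).foldl (pvStepA term) (0, [], [])
  (st.2.2 == abbv, st.2.1)

-- ===== PORT B =====
-- occ: one pass over enumerate(term), setdefault-append (= modify with default []).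
-- The Python stores each occurrence list REVERSED so that `while stack and stack[-1] < pos:
-- stack.pop()` trims passed positions from the cheap end; the Lean dict keeps the same list
-- in its natural ascending order, so that trim loop is exactly `dropWhile (· < pos)` and
-- `stack[-1]` is the head of the remaining list.
def pvBuildOcc (term : List Char) : PySem.Dict Char (List Int) :=
  (PySem.List.enumerate term).foldl
    (fun d ic => d.modify ic.2 [] (fun l => l ++ [ic.1])) PySem.Dict.empty

def pvStepB (s : PySem.Dict Char (List Int) × Int × List Int × Bool) (c : Char) :
    PySem.Dict Char (List Int) × Int × List Int × Bool :=
  let stack := (s.1.getD c []).dropWhile (fun i => decide (i < s.2.1))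
  let d := s.1.insert c stack
  match stack with
  | [] => (d, s.2.1, s.2.2.1, false)
  | i :: _ => (d, i + 1, s.2.2.1 ++ [i], s.2.2.2)

def check_order_ltr_alt (a : String) (t : String) : Bool × List Int :=
  let abbv := (PySem.Str.lower a).toList
  let term := (PySem.Str.lower t).toList
  let st := abbv.foldl pvStepB (pvBuildOcc term, 0, [], true)
  (st.2.2.2, st.2.2.1)

-- ===== PRECONDITION & SPEC =====
def Spec_check_order_ltr (a : String) (t : String) (out : Bool × List Int) : Prop := out = check_order_ltr_alt a t
instance (a : String) (t : String) (out : Bool × List Int) : Decidable (Spec_check_order_ltr a t out) := by unfold Spec_check_order_ltr; infer_instance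

-- ===== CLAIM (what is proved, stated in full; the proofs are below) =====
def Claim_equal_check_order_ltr : Prop := ∀ (a : String) (t : String), Dom_check_order_ltr a t → Spec_check_order_ltr a t (check_order_ltr a t)

-- ===== LEMMAS AND PROOFS =====

-- occurrences of c in l (absolute indices, ascending), enumeration starting at s
def pvF (l : List Char) (s : Int) (c : Char) : List Int :=
  ((PySem.List.enumerate l s).filter (fun q => q.2 == c)).map (·.1)

theorem pvInnerA_enumerate (c : Char) (l : List Char) (s : Int) :
    pvInnerA c (PySem.List.enumerate l s) = (l.findIdx? (fun x => c == x)).map (fun i => s + (i : Int)) := by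
  induction l generalizing s with
  | nil => simp [PySem.List.enumerate_nil, pvInnerA]
  | cons x xs ih =>
    rw [PySem.List.enumerate_cons]
    by_cases hcx : c == x
    · simp [pvInnerA, hcx, List.findIdx?_cons]
    · simp only [pvInnerA, hcx, if_false, ih, List.findIdx?_cons, Bool.false_eq_true]
      cases xs.findIdx? (fun x => c == x) <;> simp [Int.add_comm, Int.add_left_comm]

theorem pvBuildOcc_getD (ps : List (Int × Char)) (d : PySem.Dict Char (List Int)) (c : Char) :
    (ps.foldl (fun d ic => d.modify ic.2 [] (fun l => l ++ [ic.1])) d).getD c []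
      = d.getD c [] ++ (ps.filter (fun q => q.2 == c)).map (·.1) := by
  induction ps generalizing d with
  | nil => simp
  | cons p ps ih =>
    rw [List.foldl_cons, ih, List.filter_cons, PySem.Dict.getD_modify]
    by_cases h : p.2 = c
    · simp [h]
    · have h' : ¬ c = p.2 := fun he => h he.symm
      simp [h, h']

theorem pvF_mem (l : List Char) (s : Int) (c : Char) (i : Int) (h : i ∈ pvF l s c) : s ≤ i := by
  unfold pvF at h
  simp only [List.mem_map, List.mem_filter] at h
  obtain ⟨q, ⟨hq, -⟩, rfl⟩ := h
  obtain ⟨k, -, rfl⟩ := (PySem.List.mem_enumerate_iff _ _ _).mp hq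
  simp

theorem pvF_cons (x : Char) (xs : List Char) (s : Int) (c : Char) :
    pvF (x :: xs) s c = (if x == c then [s] else []) ++ pvF xs (s + 1) c := by
  rw [pvF, PySem.List.enumerate_cons, List.filter_cons]
  by_cases h : x == c <;> simp [pvF, h]

theorem pvF_drop (c : Char) (l : List Char) (s k : Nat) (hsk : s ≤ k) :
    (pvF l (s : Int) c).dropWhile (fun i => decide (i < (k : Int)))
      = pvF (l.drop (k - s)) (k : Int) c := by
  induction l generalizing s with
  | nil => simp [pvF, PySem.List.enumerate_nil]
  | cons x xs ih =>
    have hstep : ((s : Int) + 1) = ((s + 1 : Nat) : Int) := by push_cast; ring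
    by_cases hsk' : s = k
    · subst hsk'
      rw [Nat.sub_self, List.drop_zero, List.dropWhile_eq_self_iff.mpr]
      intro hlen
      have := pvF_mem (x :: xs) (s : Int) c _ (List.getElem_mem hlen)
      simp; omega
    · have hlt : s < k := lt_of_le_of_ne hsk hsk'
      have hks : k - s = (k - (s + 1)) + 1 := by omega
      by_cases hxc : (x == c) = true
      · rw [pvF_cons, if_pos hxc, List.singleton_append,
          List.dropWhile_cons_of_pos (by simp; omega), hstep, ih (s + 1) (by omega),
          hks, List.drop_succ_cons]
      · rw [pvF_cons, if_neg hxc, List.nil_append, hstep, ih (s + 1) (by omega),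
          hks, List.drop_succ_cons]

theorem pvF_head (c : Char) (m : List Char) (s : Nat) :
    (pvF m (s : Int) c).head?
      = (m.findIdx? (fun x => c == x)).map (fun j => ((s + j : Nat) : Int)) := by
  induction m generalizing s with
  | nil => simp [pvF, PySem.List.enumerate_nil]
  | cons x xs ih =>
    have hstep : ((s : Int) + 1) = ((s + 1 : Nat) : Int) := by push_cast; ring
    by_cases hxc : (x == c) = true
    · have hcx : (c == x) = true := by simp only [beq_iff_eq] at hxc ⊢; exact hxc.symm
      rw [pvF_cons, if_pos hxc, List.singleton_append, List.findIdx?_cons]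
      simp only [hcx, if_true]
      simp
    · have hcx : ¬ ((c == x) = true) := by
        simp only [beq_iff_eq] at hxc ⊢
        exact fun h => hxc h.symm
      rw [pvF_cons, if_neg hxc, List.nil_append, hstep, ih, List.findIdx?_cons, if_neg hcx]
      simp only [Option.map_map]
      cases xs.findIdx? (fun x => c == x) with
      | none => simp
      | some j => simp; omega


theorem pvDropWhile_dropWhile (L : List Int) (a b : Int) (hab : a ≤ b) :
    (L.dropWhile (fun i => decide (i < a))).dropWhile (fun i => decide (i < b))
      = L.dropWhile (fun i => decide (i < b)) := by
  induction L with
  | nil => simp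
  | cons x xs ih =>
    by_cases hx : x < a
    · rw [List.dropWhile_cons_of_pos (by simpa using hx), ih,
        List.dropWhile_cons_of_pos (by simp; omega)]
    · rw [List.dropWhile_cons_of_neg (by simpa using hx)]

theorem pvLoop (term : List Char) (rest : List Char) :
    ∀ (s : Int) (k : Nat), k ≤ term.length →
    ∀ (lst : List Int) (oms p : List Char) (flag : Bool) (d : PySem.Dict Char (List Int)),
      oms.length ≤ p.length → (flag = true ↔ oms = p) →
      (∀ c, (d.getD c []).dropWhile (fun i => decide (i < (k : Int)))
          = (pvF term 0 c).dropWhile (fun i => decide (i < (k : Int)))) →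
      (((PySem.List.enumerate rest s).foldl (pvStepA term) ((k : Int), lst, oms)).2.1
        = (rest.foldl pvStepB (d, (k : Int), lst, flag)).2.2.1) ∧
      (((rest.foldl pvStepB (d, (k : Int), lst, flag)).2.2.2 = true) ↔
        ((PySem.List.enumerate rest s).foldl (pvStepA term) ((k : Int), lst, oms)).2.2 = p ++ rest) := by
  induction rest with
  | nil =>
    intro s k hk lst oms p flag d h1 h2 hinv
    simpa [PySem.List.enumerate_nil] using h2
  | cons c rest ih =>
    intro s k hk lst oms p flag d h1 h2 hinv
    rw [PySem.List.enumerate_cons, List.foldl_cons, List.foldl_cons]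
    have hstack : (d.getD c []).dropWhile (fun i => decide (i < (k : Int)))
        = pvF (term.drop k) (k : Int) c := by
      rw [hinv c]
      have := pvF_drop c term 0 k (Nat.zero_le k)
      simpa using this
    cases h : (term.drop k).findIdx? (fun x => c == x) with
    | none =>
      have hempty : pvF (term.drop k) (k : Int) c = [] := by
        have hh := pvF_head c (term.drop k) k
        rw [h] at hh
        simpa using hh
      have hA : pvStepA term ((k : Int), lst, oms) (s, c) = ((k : Int), lst, oms) := by
        simp [pvStepA, PySem.List.slice_from_natCast, pvInnerA_enumerate, h]
      have hB : pvStepB (d, (k : Int), lst, flag) c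
          = (d.insert c [], (k : Int), lst, false) := by
        simp only [pvStepB, hstack, hempty]
      rw [hA, hB]
      have h2' : (false = true) ↔ oms = p ++ [c] := by
        constructor
        · simp
        · intro he; exfalso
          have := congrArg List.length he
          simp at this; omega
      have hinv' : ∀ c', ((d.insert c []).getD c' []).dropWhile (fun i => decide (i < (k : Int)))
          = (pvF term 0 c').dropWhile (fun i => decide (i < (k : Int))) := by
        intro c'
        rw [PySem.Dict.getD_insert]
        by_cases hc : c' = c
        · subst hc
          rw [if_pos rfl, ← hinv c', hstack, hempty]
          simp
        · rw [if_neg hc, hinv c']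
      have := ih (s + 1) k hk lst oms (p ++ [c]) false (d.insert c [])
        (by simp only [List.length_append, List.length_cons, List.length_nil]; omega) h2' hinv'
      simpa using this
    | some j =>
      obtain ⟨hj, hpj, -⟩ := List.findIdx?_eq_some_iff_getElem.mp h
      have hjlen : j < term.length - k := by simpa using hj
      obtain ⟨tl, htl⟩ : ∃ tl, pvF (term.drop k) (k : Int) c = ((k + j : Nat) : Int) :: tl := by
        have hh := pvF_head c (term.drop k) k
        rw [h] at hh
        simp only [Option.map_some] at hh
        cases hl : pvF (term.drop k) (k : Int) c with
        | nil => rw [hl] at hh; simp at hh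
        | cons y tl =>
          rw [hl] at hh
          simp only [List.head?_cons, Option.some.injEq] at hh
          exact ⟨tl, by rw [hh]⟩
      have hstack' : (d.getD c []).dropWhile (fun i => decide (i < (k : Int)))
          = ((k + j : Nat) : Int) :: tl := hstack.trans htl
      have hA : pvStepA term ((k : Int), lst, oms) (s, c)
          = (((k + j + 1 : Nat) : Int), lst ++ [((k + j : Nat) : Int)], oms ++ [c]) := by
        simp [pvStepA, PySem.List.slice_from_natCast, pvInnerA_enumerate, h]
      have hB : pvStepB (d, (k : Int), lst, flag) c
          = (d.insert c (((k + j : Nat) : Int) :: tl),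
             ((k + j + 1 : Nat) : Int), lst ++ [((k + j : Nat) : Int)], flag) := by
        have hcast : ((k + j : Nat) : Int) + 1 = ((k + j + 1 : Nat) : Int) := by push_cast; ring
        simp only [pvStepB, hstack', hcast]
      rw [hA, hB]
      have h2' : (flag = true) ↔ oms ++ [c] = p ++ [c] := by
        rw [h2]; exact (List.append_left_inj _).symm
      have hinv' : ∀ c',
          ((d.insert c (((k + j : Nat) : Int) :: tl)).getD c' []).dropWhile
              (fun i => decide (i < ((k + j + 1 : Nat) : Int)))
            = (pvF term 0 c').dropWhile (fun i => decide (i < ((k + j + 1 : Nat) : Int))) := by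
        intro c'
        have hle : (k : Int) ≤ ((k + j + 1 : Nat) : Int) := by push_cast; omega
        rw [PySem.Dict.getD_insert]
        by_cases hc : c' = c
        · subst hc
          rw [if_pos rfl, ← hstack', hinv c', pvDropWhile_dropWhile _ _ _ hle]
        · rw [if_neg hc]
          have e1 : (d.getD c' []).dropWhile (fun i => decide (i < ((k + j + 1 : Nat) : Int)))
              = ((d.getD c' []).dropWhile (fun i => decide (i < (k : Int)))).dropWhile
                  (fun i => decide (i < ((k + j + 1 : Nat) : Int))) :=
            (pvDropWhile_dropWhile _ _ _ hle).symm
          rw [e1, hinv c', pvDropWhile_dropWhile _ _ _ hle]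
      have := ih (s + 1) (k + j + 1) (by omega) (lst ++ [((k + j : Nat) : Int)])
        (oms ++ [c]) (p ++ [c]) flag _ (by simp; omega) h2' hinv'
      simpa using this

-- ===== VERDICT (by name: the statement is the Claim_ definition above) =====
theorem check_order_ltr_spec : Claim_equal_check_order_ltr := by
  intro a t _
  unfold Spec_check_order_ltr check_order_ltr check_order_ltr_alt
  have hinv0 : ∀ c, ((pvBuildOcc ((PySem.Str.lower t).toList)).getD c []).dropWhile
      (fun i => decide (i < ((0 : Nat) : Int)))
      = (pvF ((PySem.Str.lower t).toList) 0 c).dropWhile (fun i => decide (i < ((0 : Nat) : Int))) := by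
    intro c
    rw [pvBuildOcc, pvBuildOcc_getD]
    simp [pvF]
  have h := pvLoop ((PySem.Str.lower t).toList) ((PySem.Str.lower a).toList) 0 0
    (by simp) [] [] [] true (pvBuildOcc ((PySem.Str.lower t).toList))
    (by simp) (by simp) (by simpa using hinv0)
  obtain ⟨h1, h2⟩ := h
  refine Prod.ext ?_ ?_
  · show (_ == (PySem.Str.lower a).toList) = _
    rw [Bool.eq_iff_iff, beq_iff_eq]
    simpa using h2.symm
  · simpa using h1
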